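-- pv_equiv track=rewrite | github.com/QLNI/BODHI | bodhi_llm_bridge.py | _derepeat
-- ===== SOURCE A (Python) =====
-- def _derepeat(text: str, max_run: int = 3) -> str:
--     """Remove char runs longer than max_run — pure integer loop."""
--     if not text:
--         return text
--     result = [text[0]]
--     run = 1
--     for ch in text[1:]:
--         if ch == result[-1]:
--             run += 1
--             if run <= max_run:
--                 result.append(ch)
--         else:
--             run = 1
--             result.append(ch)
--     return "".join(result)
-- ===== SOURCE B (Python) =====
-- def _derepeat(text: str, max_run: int = 3) -> str:
--     """Collapse runs longer than max_run: two-pointer scan over maximal runs."""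
--     keep = max(1, max_run)
--     pieces = []
--     i, n = 0, len(text)
--     while i < n:
--         ch = text[i]
--         j = i + 1
--         while j < n and text[j] == ch:
--             j += 1
--         pieces.append(ch * min(j - i, keep))
--         i = j
--     return "".join(pieces)
-- ===== Notes on version B (the rewrite author's own statement) =====
-- stated objective: alternative
-- what changed: B replaces A's char-by-char loop (last-element comparison plus a running counter) with a two-pointer run decomposition: an inner scan finds the end of each maximal run and the character is emitted min(run_len, max(1, max_run)) times via string multiplication.
import Mathlib
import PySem

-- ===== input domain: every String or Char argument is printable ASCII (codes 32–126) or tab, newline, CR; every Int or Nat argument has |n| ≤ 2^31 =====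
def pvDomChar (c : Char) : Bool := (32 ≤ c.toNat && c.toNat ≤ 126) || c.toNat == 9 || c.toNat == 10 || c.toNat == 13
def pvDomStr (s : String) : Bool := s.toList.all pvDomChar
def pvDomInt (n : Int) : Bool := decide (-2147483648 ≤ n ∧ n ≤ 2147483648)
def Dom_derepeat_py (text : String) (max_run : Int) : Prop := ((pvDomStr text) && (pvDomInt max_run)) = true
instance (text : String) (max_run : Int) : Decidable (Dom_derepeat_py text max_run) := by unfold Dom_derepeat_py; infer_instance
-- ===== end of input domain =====

-- B collapses each maximal character run to min(run length, max(1, max_run)) copies by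
-- run decomposition; A walks char by char with a counter. Return values are proved equal.

-- ===== PORT A =====
-- loop body of A: state = (result, run); `result[-1]` is `st.1.getLast?` (result is never empty)
def stepA (max_run : Int) (st : List Char × Int) (ch : Char) : List Char × Int :=
  if st.1.getLast? = some ch then
    let run := st.2 + 1
    (if run ≤ max_run then st.1 ++ [ch] else st.1, run)
  else
    (st.1 ++ [ch], 1)

def derepeat_py (text : String) (max_run : Int) : String :=
  match text.toList with
  | [] => text                                  -- `if not text: return text`
  | c :: rest => String.ofList ((rest.foldl (stepA max_run) ([c], 1)).1)

-- ===== PORT B =====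
-- inner while loop of B's `go`: length of the run of `ch` at the front of the tail
def spanLenB (ch : Char) : List Char → Nat
  | [] => 0
  | c :: rest => if c = ch then 1 + spanLenB ch rest else 0

-- B's recursive `go`
def goB (keep : Nat) : List Char → List Char
  | [] => []
  | ch :: rest =>
    let m := spanLenB ch rest
    List.replicate (min (1 + m) keep) ch ++ goB keep (rest.drop m)
termination_by l => l.length
decreasing_by simp

def derepeat_py_alt (text : String) (max_run : Int) : String :=
  String.ofList (goB (max 1 max_run).toNat text.toList)

-- ===== PRECONDITION & SPEC =====
def Spec_derepeat_py (text : String) (max_run : Int) (out : String) : Prop := out = derepeat_py_alt text max_run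
instance (text : String) (max_run : Int) (out : String) : Decidable (Spec_derepeat_py text max_run out) := by unfold Spec_derepeat_py; infer_instance

-- ===== CLAIM (what is proved, stated in full; the proofs are below) =====
def Claim_equal_derepeat_py : Prop := ∀ (text : String) (max_run : Int), Dom_derepeat_py text max_run → Spec_derepeat_py text max_run (derepeat_py text max_run)

-- ===== LEMMAS AND PROOFS =====

theorem goB_nil (keep : Nat) : goB keep [] = [] := by rw [goB]

theorem goB_cons (keep : Nat) (ch : Char) (rest : List Char) :
    goB keep (ch :: rest) =
      List.replicate (min (1 + spanLenB ch rest) keep) ch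
        ++ goB keep (rest.drop (spanLenB ch rest)) := by
  rw [goB]

-- the span decomposition: l = replicate (spanLenB c l) c ++ drop (spanLenB c l) l
theorem span_decomp (c : Char) (l : List Char) :
    List.replicate (spanLenB c l) c ++ l.drop (spanLenB c l) = l := by
  induction l with
  | nil => simp [spanLenB]
  | cons d rest ih =>
    by_cases h : d = c
    · subst h
      simp [spanLenB, Nat.add_comm 1, List.replicate_succ, List.drop_succ_cons, ih]
    · simp [spanLenB, h]

theorem span_head (c : Char) (l : List Char) :
    (l.drop (spanLenB c l)).head? ≠ some c := by
  induction l with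
  | nil => simp [spanLenB]
  | cons d rest ih =>
    by_cases h : d = c
    · subst h
      have hs : spanLenB d (d :: rest) = spanLenB d rest + 1 := by
        simp [spanLenB, Nat.add_comm]
      rw [hs, List.drop_succ_cons]
      exact ih
    · simp [spanLenB, h]

theorem getLast?_replicate_concat (k : Nat) (c : Char) :
    (List.replicate (k + 1) c).getLast? = some c := by
  rw [List.replicate_succ']; exact List.getLast?_concat

-- processing a block of m copies of the current last character
theorem block_lemma (max_run : Int) (c : Char) (m : Nat) :
    ∀ (res : List Char) (run : Int), res.getLast? = some c →
      List.foldl (stepA max_run) (res, run) (List.replicate m c) =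
        (res ++ List.replicate (min max_run (run + m) - run).toNat c, run + m) := by
  induction m with
  | zero =>
    intro res run h
    have h0 : (min max_run (run + (0:Nat)) - run).toNat = 0 := by omega
    rw [h0]
    simp
  | succ m ih =>
    intro res run h
    rw [List.replicate_succ, List.foldl_cons]
    have hstep : stepA max_run (res, run) c =
        (if run + 1 ≤ max_run then res ++ [c] else res, run + 1) := by
      simp [stepA, h]
    rw [hstep]
    by_cases hle : run + 1 ≤ max_run
    · simp only [hle, if_pos]
      rw [ih (res ++ [c]) (run + 1) List.getLast?_concat]
      have harith : (min max_run (run + 1 + m) - (run + 1)).toNat + 1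
          = (min max_run (run + (m + 1 : Nat)) - run).toNat := by
        push_cast; omega
      have hrep : [c] ++ List.replicate (min max_run (run + 1 + (m:Int)) - (run + 1)).toNat c
          = List.replicate (min max_run (run + ((m:Nat) + 1 : Nat)) - run).toNat c := by
        rw [← harith, List.replicate_succ]
        simp
      rw [List.append_assoc, hrep]
      have : run + 1 + (m:Int) = run + ((m:Nat) + 1 : Nat) := by push_cast; ring
      rw [this]
    · simp only [hle, if_neg, not_false_iff]
      rw [ih res (run + 1) h]
      have harith : (min max_run (run + 1 + m) - (run + 1)).toNat
          = (min max_run (run + (m + 1 : Nat)) - run).toNat := by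
        push_cast; omega
      rw [harith]
      have : run + 1 + (m:Int) = run + ((m:Nat) + 1 : Nat) := by push_cast; ring
      rw [this]

-- the loop never looks at anything but the last element: a prefix passes through
theorem prefix_lemma (max_run : Int) (p : List Char) (l : List Char) :
    ∀ (res : List Char) (run : Int), res ≠ [] →
      (List.foldl (stepA max_run) (p ++ res, run) l).1
        = p ++ (List.foldl (stepA max_run) (res, run) l).1 := by
  induction l with
  | nil => intro res run _; simp
  | cons ch rest ih =>
    intro res run hne
    rw [List.foldl_cons, List.foldl_cons]
    have hlast : (p ++ res).getLast? = res.getLast? := List.getLast?_append_of_ne_nil _ hne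
    by_cases h : res.getLast? = some ch
    · by_cases h2 : run + 1 ≤ max_run
      · have e1 : stepA max_run (p ++ res, run) ch = (p ++ (res ++ [ch]), run + 1) := by
          simp [stepA, hlast, h, h2]
        have e2 : stepA max_run (res, run) ch = (res ++ [ch], run + 1) := by
          simp [stepA, h, h2]
        rw [e1, e2]; exact ih _ _ (by simp)
      · have e1 : stepA max_run (p ++ res, run) ch = (p ++ res, run + 1) := by
          simp [stepA, hlast, h, h2]
        have e2 : stepA max_run (res, run) ch = (res, run + 1) := by
          simp [stepA, h, h2]
        rw [e1, e2]; exact ih _ _ hne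
    · have e1 : stepA max_run (p ++ res, run) ch = (p ++ (res ++ [ch]), 1) := by
        simp [stepA, hlast, h]
      have e2 : stepA max_run (res, run) ch = (res ++ [ch], 1) := by
        simp [stepA, h]
      rw [e1, e2]; exact ih _ _ (by simp)

-- the main correspondence, by strong induction on the length of the tail
theorem main_lemma (max_run : Int) :
    ∀ (n : Nat) (c : Char) (rest : List Char), rest.length ≤ n →
      (List.foldl (stepA max_run) ([c], (1:Int)) rest).1
        = goB (max 1 max_run).toNat (c :: rest) := by
  intro n
  induction n with
  | zero =>
    intro c rest hlen
    have h0 : rest = [] := List.eq_nil_of_length_eq_zero (Nat.le_zero.mp hlen)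
    subst h0
    simp [goB_cons, goB_nil, spanLenB]
  | succ n ih =>
    intro c rest hlen
    rw [goB_cons]
    have hdecomp := span_decomp c rest
    have hhead := span_head c rest
    have hK : 1 + (min max_run ((1:Int) + spanLenB c rest) - 1).toNat
        = min (1 + spanLenB c rest) (max 1 max_run).toNat := by
      omega
    have hblock := block_lemma max_run c (spanLenB c rest) [c] 1 (by simp)
    have hRform : [c] ++ List.replicate (min max_run ((1:Int) + spanLenB c rest) - 1).toNat c
        = List.replicate (min (1 + spanLenB c rest) (max 1 max_run).toNat) c := by
      rw [← hK, Nat.add_comm, List.replicate_succ]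
      simp
    have hfold : List.foldl (stepA max_run) ([c], (1:Int)) rest
        = List.foldl (stepA max_run)
            ([c] ++ List.replicate (min max_run ((1:Int) + spanLenB c rest) - 1).toNat c,
             1 + (spanLenB c rest : Int)) (rest.drop (spanLenB c rest)) := by
      conv_lhs => rw [← hdecomp]
      rw [List.foldl_append, hblock]
    rcases hdrop : rest.drop (spanLenB c rest) with _ | ⟨c', rest'⟩
    · rw [hfold, hdrop, List.foldl_nil]
      rw [hRform]
      simp [goB_nil]
    · have hne : c' ≠ c := by
        rw [hdrop] at hhead
        simpa using hhead
      have hRlast : ([c] ++ List.replicate (min max_run ((1:Int) + spanLenB c rest) - 1).toNat c).getLast? = some c := by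
        rw [hRform]
        have hpos : min (1 + spanLenB c rest) (max 1 max_run).toNat
            = (min (1 + spanLenB c rest) (max 1 max_run).toNat - 1) + 1 := by omega
        rw [hpos]
        exact getLast?_replicate_concat _ _
      have hcond : ¬ (([c] ++ List.replicate (min max_run ((1:Int) + spanLenB c rest) - 1).toNat c).getLast? = some c') := by
        rw [hRlast]
        simp [Ne.symm hne]
      have hstep : stepA max_run
          ([c] ++ List.replicate (min max_run ((1:Int) + spanLenB c rest) - 1).toNat c,
           1 + (spanLenB c rest : Int)) c'
          = (([c] ++ List.replicate (min max_run ((1:Int) + spanLenB c rest) - 1).toNat c) ++ [c'],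
             1) := by
        simp only [stepA, if_neg hcond]
      have hlen' : rest'.length ≤ n := by
        have h1 : (rest.drop (spanLenB c rest)).length ≤ rest.length := by
          simp
        rw [hdrop] at h1
        simp at h1
        omega
      rw [hfold, hdrop, List.foldl_cons, hstep,
        prefix_lemma max_run _ rest' [c'] 1 (by simp),
        ih c' rest' hlen', hRform]

-- ===== VERDICT (by name: the statement is the Claim_ definition above) =====
theorem derepeat_py_spec : Claim_equal_derepeat_py := by
  intro text max_run _
  unfold Spec_derepeat_py derepeat_py derepeat_py_alt
  rcases h : text.toList with _ | ⟨c, rest⟩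
  · show text = String.ofList (goB (max 1 max_run).toNat [])
    rw [goB_nil, ← h, String.ofList_toList]
  · exact congrArg String.ofList (main_lemma max_run rest.length c rest (le_refl _))
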